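-- pv_equiv track=rewrite | github.com/DarriEy/SYMFLUENCE | paper/part_2_the_registry_and_the_river/applications_and_validation /2. Model ensemble/scripts/visualize_ensemble.py | identify_model_from_params
-- ===== SOURCE A (Python) =====
-- from typing import Dict, Optional, Tuple
--
-- def identify_model_from_params(params: Dict) -> Optional[str]:
--     """Identify which model a set of parameters belongs to.
--
--     Order matters - more specific/unique parameter sets should be checked first.
--     """
--     param_names_lower = set(k.lower() for k in params.keys())
--
--     # SUMMA parameters (unique: maxwatr, baserte, qb_powr)
--     summa_params = {'maxwatr_1', 'maxwatr_2', 'baserte', 'qb_powr', 'timedelay', 'percrte', 'fracten'}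
--     if param_names_lower & summa_params:
--         return "SUMMA"
--
--     # RHESSys parameters (unique: sat_to_gw_coeff, gw_loss_coeff)
--     rhessys_params = {'sat_to_gw_coeff', 'gw_loss_coeff', 'ksat_0', 'porosity_0', 'soil_depth'}
--     if param_names_lower & rhessys_params:
--         return "RHESSys"
--
--     # GR4J parameters (unique: x1, x2, x3, x4)
--     gr4j_params = {'x1', 'x2', 'x3', 'x4'}
--     if param_names_lower & gr4j_params:
--         return "GR4J"
--
--     # FUSE parameters (unique: rferr_add, frchzne, percfrac, etc.)
--     fuse_specific = {'rferr_add', 'rferr_mlt', 'frchzne', 'percfrac', 'fprimqb', 'qbrate_2a', 'qbrate_2b', 'qb_prms', 'rtfrac1', 'percexp', 'sacpmlt', 'sacpexp', 'iflwrte', 'axv_bexp', 'saession', 'loglamb', 'tishape'}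
--     if param_names_lower & fuse_specific:
--         return "FUSE"
--
--     # jFUSE parameters
--     if any(p.startswith('jfuse') for p in param_names_lower):
--         return "jFUSE"
--
--     # HYPE parameters - CHECK BEFORE HBV because they share 'lp'
--     # Use unique HYPE params: cevp, cmlt, ttmp, rrcs1, rrcs2
--     hype_unique = {'cevp', 'cmlt', 'ttmp', 'rrcs1', 'rrcs2', 'rcgrw', 'rivvel', 'epotdist'}
--     if param_names_lower & hype_unique:
--         return "HYPE"
--
--     # HBV parameters - use unique HBV params (not 'lp' which is shared with HYPE)
--     hbv_unique = {'fc', 'beta', 'k0', 'k1', 'k2', 'maxbas', 'perc'}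
--     if param_names_lower & hbv_unique:
--         return "HBV"
--
--     # MESH parameters
--     mesh_specific = {'r2n', 'r1n', 'flz', 'pwr', 'zsnl', 'zpls', 'zplg', 'sdep', 'xslp', 'grkf', 'wfci', 'fare', 'drn', 'orgm'}
--     if param_names_lower & mesh_specific:
--         return "MESH"
--
--     # LSTM parameters
--     lstm_params = {'hidden_size', 'num_layers', 'dropout', 'learning_rate', 'batch_size', 'seq_length', 'epochs', 'patience', 'lookback', 'lstm_hidden', 'lstm_layers', 'lr', 'weight_decay'}
--     if param_names_lower & lstm_params:
--         return "LSTM"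
--
--     # ngen CFE parameters (NextGen Conceptual Functional Equivalent)
--     ngen_cfe_params = {'maxsmc', 'satdk', 'bb', 'slop', 'smcmax', 'smcwlt', 'refkdt', 'dksat', 'slope', 'expon', 'max_gw_storage', 'cgw', 'k_nash', 'klf', 'kn', 'nash_n', 'giuh'}
--     if param_names_lower & ngen_cfe_params:
--         return "ngen"
--
--     return None
-- ===== SOURCE B (Python) =====
-- from typing import Dict, Optional
--
-- # Reverse index: parameter name -> priority rank of the model it identifies.
-- _MODELS = [
--     ("SUMMA", ('maxwatr_1', 'maxwatr_2', 'baserte', 'qb_powr', 'timedelay', 'percrte', 'fracten')),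
--     ("RHESSys", ('sat_to_gw_coeff', 'gw_loss_coeff', 'ksat_0', 'porosity_0', 'soil_depth')),
--     ("GR4J", ('x1', 'x2', 'x3', 'x4')),
--     ("FUSE", ('rferr_add', 'rferr_mlt', 'frchzne', 'percfrac', 'fprimqb', 'qbrate_2a', 'qbrate_2b',
--               'qb_prms', 'rtfrac1', 'percexp', 'sacpmlt', 'sacpexp', 'iflwrte', 'axv_bexp',
--               'saession', 'loglamb', 'tishape')),
--     ("jFUSE", ()),  # identified by the 'jfuse' prefix rule, at this rank
--     ("HYPE", ('cevp', 'cmlt', 'ttmp', 'rrcs1', 'rrcs2', 'rcgrw', 'rivvel', 'epotdist')),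
--     ("HBV", ('fc', 'beta', 'k0', 'k1', 'k2', 'maxbas', 'perc')),
--     ("MESH", ('r2n', 'r1n', 'flz', 'pwr', 'zsnl', 'zpls', 'zplg', 'sdep', 'xslp', 'grkf',
--               'wfci', 'fare', 'drn', 'orgm')),
--     ("LSTM", ('hidden_size', 'num_layers', 'dropout', 'learning_rate', 'batch_size', 'seq_length',
--               'epochs', 'patience', 'lookback', 'lstm_hidden', 'lstm_layers', 'lr', 'weight_decay')),
--     ("ngen", ('maxsmc', 'satdk', 'bb', 'slop', 'smcmax', 'smcwlt', 'refkdt', 'dksat', 'slope',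
--               'expon', 'max_gw_storage', 'cgw', 'k_nash', 'klf', 'kn', 'nash_n', 'giuh')),
-- ]
--
-- _RANK = {}
-- for _r, (_name, _ps) in enumerate(_MODELS):
--     for _p in _ps:
--         _RANK.setdefault(_p, _r)
--
-- _JFUSE_RANK = 4
--
--
-- def identify_model_from_params(params: Dict) -> Optional[str]:
--     """Identify which model a set of parameters belongs to (one pass over the keys)."""
--     best = None
--     for k in params.keys():
--         n = k.lower()
--         r = _RANK.get(n)
--         if r is None and n.startswith('jfuse'):
--             r = _JFUSE_RANK
--         if r is not None and (best is None or r < best):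
--             best = r
--     return _MODELS[best][0] if best is not None else None
-- ===== Notes on version B (the rewrite author's own statement) =====
-- stated objective: alternative
-- what changed: A tests each model's parameter set against the key set in priority order (ten set intersections); B builds a static reverse index mapping each known parameter name to its model's priority rank once, then makes a single pass over the keys tracking the minimum rank (with the jfuse-prefix rule inlined at its rank) and returns the model name at the best rank.
import Mathlib
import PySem

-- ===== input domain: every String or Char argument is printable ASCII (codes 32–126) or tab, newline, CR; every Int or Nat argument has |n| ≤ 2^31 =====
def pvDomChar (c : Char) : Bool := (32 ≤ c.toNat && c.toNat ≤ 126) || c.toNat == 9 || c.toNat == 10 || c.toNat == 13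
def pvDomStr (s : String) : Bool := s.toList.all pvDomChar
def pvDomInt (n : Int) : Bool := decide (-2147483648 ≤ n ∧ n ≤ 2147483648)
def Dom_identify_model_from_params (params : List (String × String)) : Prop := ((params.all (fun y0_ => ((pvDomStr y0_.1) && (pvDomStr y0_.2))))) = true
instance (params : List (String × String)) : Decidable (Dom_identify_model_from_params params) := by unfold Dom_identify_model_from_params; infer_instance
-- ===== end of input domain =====

-- B replaces A's ten per-model set intersections by a reverse index (name -> model rank)
-- built once, plus one min-tracking pass over the input keys (objective: alternative).

-- ===== PORT A =====
def identify_model_from_params (params : List (String × String)) : Option String :=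
  let param_names_lower : PySem.Set String := PySem.Set.ofList (params.map (fun p => PySem.Str.lower p.1))
  let summa_params : PySem.Set String := PySem.Set.ofList ["maxwatr_1", "maxwatr_2", "baserte", "qb_powr", "timedelay", "percrte", "fracten"]
  if PySem.Set.inter param_names_lower summa_params ≠ [] then some "SUMMA"
  else
  let rhessys_params : PySem.Set String := PySem.Set.ofList ["sat_to_gw_coeff", "gw_loss_coeff", "ksat_0", "porosity_0", "soil_depth"]
  if PySem.Set.inter param_names_lower rhessys_params ≠ [] then some "RHESSys"
  else
  let gr4j_params : PySem.Set String := PySem.Set.ofList ["x1", "x2", "x3", "x4"]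
  if PySem.Set.inter param_names_lower gr4j_params ≠ [] then some "GR4J"
  else
  let fuse_specific : PySem.Set String := PySem.Set.ofList ["rferr_add", "rferr_mlt", "frchzne", "percfrac", "fprimqb", "qbrate_2a", "qbrate_2b", "qb_prms", "rtfrac1", "percexp", "sacpmlt", "sacpexp", "iflwrte", "axv_bexp", "saession", "loglamb", "tishape"]
  if PySem.Set.inter param_names_lower fuse_specific ≠ [] then some "FUSE"
  else
  if param_names_lower.any (fun p => PySem.Str.startswith p "jfuse") then some "jFUSE"
  else
  let hype_unique : PySem.Set String := PySem.Set.ofList ["cevp", "cmlt", "ttmp", "rrcs1", "rrcs2", "rcgrw", "rivvel", "epotdist"]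
  if PySem.Set.inter param_names_lower hype_unique ≠ [] then some "HYPE"
  else
  let hbv_unique : PySem.Set String := PySem.Set.ofList ["fc", "beta", "k0", "k1", "k2", "maxbas", "perc"]
  if PySem.Set.inter param_names_lower hbv_unique ≠ [] then some "HBV"
  else
  let mesh_specific : PySem.Set String := PySem.Set.ofList ["r2n", "r1n", "flz", "pwr", "zsnl", "zpls", "zplg", "sdep", "xslp", "grkf", "wfci", "fare", "drn", "orgm"]
  if PySem.Set.inter param_names_lower mesh_specific ≠ [] then some "MESH"
  else
  let lstm_params : PySem.Set String := PySem.Set.ofList ["hidden_size", "num_layers", "dropout", "learning_rate", "batch_size", "seq_length", "epochs", "patience", "lookback", "lstm_hidden", "lstm_layers", "lr", "weight_decay"]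
  if PySem.Set.inter param_names_lower lstm_params ≠ [] then some "LSTM"
  else
  let ngen_cfe_params : PySem.Set String := PySem.Set.ofList ["maxsmc", "satdk", "bb", "slop", "smcmax", "smcwlt", "refkdt", "dksat", "slope", "expon", "max_gw_storage", "cgw", "k_nash", "klf", "kn", "nash_n", "giuh"]
  if PySem.Set.inter param_names_lower ngen_cfe_params ≠ [] then some "ngen"
  else none

-- ===== PORT B =====
def pvModels : List (String × List String) :=
  [("SUMMA", ["maxwatr_1", "maxwatr_2", "baserte", "qb_powr", "timedelay", "percrte", "fracten"]),
   ("RHESSys", ["sat_to_gw_coeff", "gw_loss_coeff", "ksat_0", "porosity_0", "soil_depth"]),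
   ("GR4J", ["x1", "x2", "x3", "x4"]),
   ("FUSE", ["rferr_add", "rferr_mlt", "frchzne", "percfrac", "fprimqb", "qbrate_2a", "qbrate_2b", "qb_prms", "rtfrac1", "percexp", "sacpmlt", "sacpexp", "iflwrte", "axv_bexp", "saession", "loglamb", "tishape"]),
   ("jFUSE", []),
   ("HYPE", ["cevp", "cmlt", "ttmp", "rrcs1", "rrcs2", "rcgrw", "rivvel", "epotdist"]),
   ("HBV", ["fc", "beta", "k0", "k1", "k2", "maxbas", "perc"]),
   ("MESH", ["r2n", "r1n", "flz", "pwr", "zsnl", "zpls", "zplg", "sdep", "xslp", "grkf", "wfci", "fare", "drn", "orgm"]),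
   ("LSTM", ["hidden_size", "num_layers", "dropout", "learning_rate", "batch_size", "seq_length", "epochs", "patience", "lookback", "lstm_hidden", "lstm_layers", "lr", "weight_decay"]),
   ("ngen", ["maxsmc", "satdk", "bb", "slop", "smcmax", "smcwlt", "refkdt", "dksat", "slope", "expon", "max_gw_storage", "cgw", "k_nash", "klf", "kn", "nash_n", "giuh"])]

def pvRank : PySem.Dict String Int :=
  (PySem.List.enumerate pvModels 0).foldl
    (fun d rp => rp.2.2.foldl (fun d p => d.setdefault p rp.1) d) PySem.Dict.empty

def pvJfuseRank : Int := 4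

def identify_model_from_params_alt (params : List (String × String)) : Option String :=
  let best : Option Int := params.foldl
    (fun best kv =>
      let n := PySem.Str.lower kv.1
      let r : Option Int :=
        match pvRank.get? n with
        | some r => some r
        | none => if PySem.Str.startswith n "jfuse" then some pvJfuseRank else none
      match r with
      | none => best
      | some r =>
        match best with
        | none => some r
        | some b => if r < b then some r else some b) none
  match best with
  | none => none
  | some b => (PySem.List.pyGet? pvModels b).map (fun m => m.1)

-- ===== PRECONDITION & SPEC =====
def Spec_identify_model_from_params (params : List (String × String)) (out : Option String) : Prop := out = identify_model_from_params_alt params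
instance (params : List (String × String)) (out : Option String) : Decidable (Spec_identify_model_from_params params out) := by unfold Spec_identify_model_from_params; infer_instance

-- ===== CLAIM (what is proved, stated in full; the proofs are below) =====
def Claim_equal_identify_model_from_params : Prop := ∀ (params : List (String × String)), Dom_identify_model_from_params params → Spec_identify_model_from_params params (identify_model_from_params params)

-- ===== LEMMAS AND PROOFS =====

-- The ten membership tests, in A's priority order (rank 4 = the jfuse prefix rule).
def pvPreds : List (String → Bool) :=
  [fun n => (["maxwatr_1", "maxwatr_2", "baserte", "qb_powr", "timedelay", "percrte", "fracten"]).contains n,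
   fun n => (["sat_to_gw_coeff", "gw_loss_coeff", "ksat_0", "porosity_0", "soil_depth"]).contains n,
   fun n => (["x1", "x2", "x3", "x4"]).contains n,
   fun n => (["rferr_add", "rferr_mlt", "frchzne", "percfrac", "fprimqb", "qbrate_2a", "qbrate_2b", "qb_prms", "rtfrac1", "percexp", "sacpmlt", "sacpexp", "iflwrte", "axv_bexp", "saession", "loglamb", "tishape"]).contains n,
   fun n => PySem.Str.startswith n "jfuse",
   fun n => (["cevp", "cmlt", "ttmp", "rrcs1", "rrcs2", "rcgrw", "rivvel", "epotdist"]).contains n,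
   fun n => (["fc", "beta", "k0", "k1", "k2", "maxbas", "perc"]).contains n,
   fun n => (["r2n", "r1n", "flz", "pwr", "zsnl", "zpls", "zplg", "sdep", "xslp", "grkf", "wfci", "fare", "drn", "orgm"]).contains n,
   fun n => (["hidden_size", "num_layers", "dropout", "learning_rate", "batch_size", "seq_length", "epochs", "patience", "lookback", "lstm_hidden", "lstm_layers", "lr", "weight_decay"]).contains n,
   fun n => (["maxsmc", "satdk", "bb", "slop", "smcmax", "smcwlt", "refkdt", "dksat", "slope", "expon", "max_gw_storage", "cgw", "k_nash", "klf", "kn", "nash_n", "giuh"]).contains n]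

-- B's per-key min combiner (the fold step of the alt port).
def pvOmin (a b : Option Int) : Option Int :=
  match b with
  | none => a
  | some r =>
    match a with
    | none => some r
    | some x => if r < x then some r else some x

-- Nat indices (findIdx?) cast to the Int ranks B works with, with an offset.
def pvC (o : Option Nat) : Option Int := o.map (fun i => (i : Int))
def pvCs (s : Int) (o : Option Nat) : Option Int := o.map (fun i => s + (i : Int))

lemma pvC_eq_pvCs_zero (o : Option Nat) : pvC o = pvCs 0 o := by
  cases o <;> simp [pvC, pvCs]

lemma pvCs_map_succ (s : Int) (o : Option Nat) :
    pvCs s (o.map (fun i => i + 1)) = pvCs (s + 1) o := by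
  cases o <;> simp [pvCs] <;> ring

lemma pvC_map_succ (o : Option Nat) :
    pvC (o.map (fun i => i + 1)) = (pvC o).map (fun z => z + 1) := by
  cases o <;> simp [pvC]

lemma pvOmin_none_left (b : Option Int) : pvOmin none b = b := by
  cases b <;> rfl

lemma pvOmin_none_right (a : Option Int) : pvOmin a none = a := rfl

lemma pvOmin_some (x r : Int) : pvOmin (some x) (some r) = some (min x r) := by
  simp only [pvOmin]
  split_ifs <;> congr 1 <;> omega

lemma pvOmin_assoc (a b c : Option Int) : pvOmin (pvOmin a b) c = pvOmin a (pvOmin b c) := by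
  cases a <;> cases b <;> cases c <;>
    simp only [pvOmin_none_left, pvOmin_none_right, pvOmin_some, min_assoc]

lemma pvOmin_map_succ (a b : Option Int) :
    pvOmin (a.map (fun z => z + 1)) (b.map (fun z => z + 1))
      = (pvOmin a b).map (fun z => z + 1) := by
  cases a <;> cases b
  · rfl
  · rfl
  · rfl
  · simp only [Option.map_some, pvOmin_some, Option.some.injEq]
    omega

-- setdefault loop over one model's names
lemma pv_get?_setdefault_list (ps : List String) (r : Int) (d : PySem.Dict String Int) (n : String) :
    (ps.foldl (fun d p => d.setdefault p r) d).get? n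
      = (d.get? n).or (if ps.contains n then some r else none) := by
  induction ps generalizing d with
  | nil => simp
  | cons p ps ih =>
    simp only [List.foldl_cons, ih, List.contains_cons]
    by_cases h : n = p
    · subst h
      rcases hd : d.get? n with _ | v
      · simp [PySem.Dict.get?_setdefault_self, hd]
      · simp [PySem.Dict.get?_setdefault_self, hd]
    · rw [PySem.Dict.get?_setdefault_of_ne _ _ h]
      have hb : (n == p) = false := by simp [h]
      simp [hb]

-- the whole index-building loop
lemma pv_get?_build (models : List (String × List String)) (s : Int) (d : PySem.Dict String Int) (n : String) :
    ((PySem.List.enumerate models s).foldl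
        (fun d rp => rp.2.2.foldl (fun d p => d.setdefault p rp.1) d) d).get? n
      = (d.get? n).or (pvCs s (models.findIdx? (fun m => m.2.contains n))) := by
  induction models generalizing s d with
  | nil => simp [PySem.List.enumerate_nil, pvCs]
  | cons m models ih =>
    rw [PySem.List.enumerate_cons]
    simp only [List.foldl_cons, pv_get?_setdefault_list, ih, List.findIdx?_cons]
    by_cases h : m.2.contains n
    · rw [if_pos h, if_pos h]
      simp [pvCs, Option.or_assoc, Option.some_or]
    · rw [if_neg h, if_neg h]
      rw [pvCs_map_succ]
      simp [Option.or_assoc]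

lemma pv_get?_pvRank (n : String) :
    pvRank.get? n = pvC (pvModels.findIdx? (fun m => m.2.contains n)) := by
  rw [pvRank, pv_get?_build, pvC_eq_pvCs_zero]
  simp

-- no name of any model's set starts with "jfuse"
lemma pv_jfuse_excl (l : List String) (hl : ∀ m ∈ l, PySem.Str.startswith m "jfuse" = false)
    (n : String) (h : PySem.Str.startswith n "jfuse" = true) : l.contains n = false := by
  cases hc : l.contains n
  · rfl
  · exfalso
    have hm : n ∈ l := List.contains_iff_mem.mp hc
    have hx := hl n hm
    rw [h] at hx
    exact Bool.noConfusion hx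

-- per-key rank as B computes it = first matching predicate in A's order
lemma pv_perElem (n : String) :
    (match pvRank.get? n with
     | some r => some r
     | none => if PySem.Str.startswith n "jfuse" then some pvJfuseRank else none)
      = pvC (pvPreds.findIdx? (fun m => m n)) := by
  rw [pv_get?_pvRank]
  by_cases hsw : PySem.Str.startswith n "jfuse" = true
  · have h0 := pv_jfuse_excl (pvModels.get ⟨0, by decide⟩).2 (by decide) n hsw
    have h1 := pv_jfuse_excl (pvModels.get ⟨1, by decide⟩).2 (by decide) n hsw
    have h2 := pv_jfuse_excl (pvModels.get ⟨2, by decide⟩).2 (by decide) n hsw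
    have h3 := pv_jfuse_excl (pvModels.get ⟨3, by decide⟩).2 (by decide) n hsw
    have h5 := pv_jfuse_excl (pvModels.get ⟨5, by decide⟩).2 (by decide) n hsw
    have h6 := pv_jfuse_excl (pvModels.get ⟨6, by decide⟩).2 (by decide) n hsw
    have h7 := pv_jfuse_excl (pvModels.get ⟨7, by decide⟩).2 (by decide) n hsw
    have h8 := pv_jfuse_excl (pvModels.get ⟨8, by decide⟩).2 (by decide) n hsw
    have h9 := pv_jfuse_excl (pvModels.get ⟨9, by decide⟩).2 (by decide) n hsw
    simp only [pvModels, List.get] at h0 h1 h2 h3 h5 h6 h7 h8 h9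
    have hswc : PySem.Chars.startswith n.toList ['j','f','u','s','e'] = true := by
      simpa using hsw
    have hF : pvModels.findIdx? (fun m => m.2.contains n) = none := by
      rw [List.findIdx?_eq_none_iff]
      intro x hx
      fin_cases hx <;> simp_all
    have hP : pvPreds.findIdx? (fun m => m n) = some 4 := by
      simp only [pvPreds, List.findIdx?_cons, h0, h1, h2, h3, hsw]
      simp
    rw [hF, hP]
    simp [pvC, pvJfuseRank, hsw, hswc]
  · have hsw' : PySem.Str.startswith n "jfuse" = false := by
      cases h : PySem.Str.startswith n "jfuse"
      · rfl
      · exact absurd h hsw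
    have hsw2 : PySem.Chars.startswith n.toList ['j','f','u','s','e'] = false := by
      simpa using hsw'
    have hPF : pvPreds.findIdx? (fun m => m n)
        = pvModels.findIdx? (fun m => m.2.contains n) := by
      simp only [pvPreds, pvModels, List.findIdx?_cons, hsw', List.contains_nil, List.findIdx?_nil,
        Bool.false_eq_true, if_false]
    rw [hPF]
    cases hF : pvModels.findIdx? (fun m => m.2.contains n) <;> simp [hF, pvC, hsw', hsw2]

-- the min-tracking fold computes the first predicate matched by any key
lemma pv_fold_key (ps : List (String → Bool)) (n : String) (L : List String) :
    pvOmin (pvC (ps.findIdx? (fun m => m n))) (pvC (ps.findIdx? (fun m => L.any m)))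
      = pvC (ps.findIdx? (fun m => (n :: L).any m)) := by
  induction ps with
  | nil => simp [pvOmin, pvC]
  | cons m ps ih =>
    simp only [List.findIdx?_cons, List.any_cons]
    by_cases hm : m n
    · by_cases hl : L.any m <;>
        · simp only [hm, hl, Bool.true_or, Bool.or_true, Bool.true_eq_false, if_true]
          cases h : ps.findIdx? (fun m => L.any m) <;>
            simp [pvOmin, pvC, h] <;> omega
    · by_cases hl : L.any m
      · simp only [hm, hl, Bool.false_or, Bool.or_true, if_true, Bool.false_eq_true, if_false]
        cases h : ps.findIdx? (fun m => m n) <;>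
          simp [pvOmin, pvC, h] <;> omega
      · simp only [hm, hl, Bool.false_or, Bool.false_eq_true, if_false]
        rw [pvC_map_succ, pvC_map_succ, pvC_map_succ, pvOmin_map_succ, ih]
        simp only [List.any_cons]

lemma pv_foldl_min (g : String → Option Int)
    (hg : ∀ n, g n = pvC (pvPreds.findIdx? (fun m => m n)))
    (L : List String) (acc : Option Int) :
    L.foldl (fun a n => pvOmin a (g n)) acc
      = pvOmin acc (pvC (pvPreds.findIdx? (fun m => L.any m))) := by
  induction L generalizing acc with
  | nil =>
    have h : pvPreds.findIdx? (fun m => ([] : List String).any m) = none := by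
      rw [List.findIdx?_eq_none_iff]; intro x _; rfl
    rw [List.foldl_nil, h]
    rfl
  | cons n L ih =>
    rw [List.foldl_cons, ih, hg, pvOmin_assoc, pv_fold_key]

-- Set-intersection truthiness on A's side = List.any over the lowered keys
lemma pv_inter_ne_nil (xs ys : List String) :
    (PySem.Set.inter (PySem.Set.ofList xs) (PySem.Set.ofList ys) ≠ []) ↔
      xs.any (fun x => ys.contains x) = true := by
  constructor
  · intro h
    obtain ⟨x, hx⟩ := List.exists_mem_of_ne_nil _ h
    obtain ⟨hx1, hx2⟩ := (PySem.Set.mem_inter _ _ _).mp hx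
    refine List.any_eq_true.mpr ⟨x, (PySem.Set.mem_ofList _ _).mp hx1, ?_⟩
    exact List.contains_iff_mem.mpr ((PySem.Set.mem_ofList _ _).mp hx2)
  · intro h hnil
    obtain ⟨x, hx, hy⟩ := List.any_eq_true.mp h
    have hmem : x ∈ PySem.Set.inter (PySem.Set.ofList xs) (PySem.Set.ofList ys) :=
      (PySem.Set.mem_inter _ _ _).mpr
        ⟨(PySem.Set.mem_ofList _ _).mpr hx,
         (PySem.Set.mem_ofList _ _).mpr (List.contains_iff_mem.mp hy)⟩
    rw [hnil] at hmem
    exact (List.not_mem_nil).elim hmem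

lemma pv_set_any (xs : List String) (f : String → Bool) :
    (PySem.Set.ofList xs).any f = xs.any f := by
  rcases h : xs.any f
  · simp only [List.any_eq_false] at h ⊢
    intro x hx
    exact h x ((PySem.Set.mem_ofList xs x).mp hx)
  · simp only [List.any_eq_true] at h ⊢
    obtain ⟨x, hx, hf⟩ := h
    exact ⟨x, (PySem.Set.mem_ofList xs x).mpr hx, hf⟩

-- B's whole fold, characterised
set_option maxRecDepth 8192 in
lemma pv_alt_eq (params : List (String × String)) :
    identify_model_from_params_alt params
      = (pvC (pvPreds.findIdx?
          (fun m => (params.map (fun p => PySem.Str.lower p.1)).any m))).bind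
            (fun b => (PySem.List.pyGet? pvModels b).map (fun m => m.1)) := by
  unfold identify_model_from_params_alt
  have hB : params.foldl
      (fun best kv =>
        let n := PySem.Str.lower kv.1
        let r : Option Int :=
          match pvRank.get? n with
          | some r => some r
          | none => if PySem.Str.startswith n "jfuse" then some pvJfuseRank else none
        match r with
        | none => best
        | some r =>
          match best with
          | none => some r
          | some b => if r < b then some r else some b) none
      = (params.map (fun p => PySem.Str.lower p.1)).foldl
          (fun a n => pvOmin a
            (match pvRank.get? n with
             | some r => some r
             | none => if PySem.Str.startswith n "jfuse" then some pvJfuseRank else none)) none := by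
    rw [List.foldl_map]
    rfl
  rw [hB, pv_foldl_min _ (fun n => pv_perElem n), pvOmin_none_left]
  cases pvC (pvPreds.findIdx?
      (fun m => (params.map (fun p => PySem.Str.lower p.1)).any m)) <;> rfl

-- ===== VERDICT (by name: the statement is the Claim_ definition above) =====
set_option maxHeartbeats 1000000 in
theorem identify_model_from_params_spec : Claim_equal_identify_model_from_params := by
  intro params _
  unfold Spec_identify_model_from_params
  rw [pv_alt_eq]
  unfold identify_model_from_params
  conv_lhs => simp only [pv_inter_ne_nil, pv_set_any]
  conv_rhs => simp only [pvPreds, List.findIdx?_cons, List.findIdx?_nil]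
  generalize ((params.map (fun p => PySem.Str.lower p.1)).any (fun x => (["maxwatr_1", "maxwatr_2", "baserte", "qb_powr", "timedelay", "percrte", "fracten"] : List String).contains x)) = b0
  generalize ((params.map (fun p => PySem.Str.lower p.1)).any (fun x => (["sat_to_gw_coeff", "gw_loss_coeff", "ksat_0", "porosity_0", "soil_depth"] : List String).contains x)) = b1
  generalize ((params.map (fun p => PySem.Str.lower p.1)).any (fun x => (["x1", "x2", "x3", "x4"] : List String).contains x)) = b2
  generalize ((params.map (fun p => PySem.Str.lower p.1)).any (fun x => (["rferr_add", "rferr_mlt", "frchzne", "percfrac", "fprimqb", "qbrate_2a", "qbrate_2b", "qb_prms", "rtfrac1", "percexp", "sacpmlt", "sacpexp", "iflwrte", "axv_bexp", "saession", "loglamb", "tishape"] : List String).contains x)) = b3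
  generalize ((params.map (fun p => PySem.Str.lower p.1)).any (fun p => PySem.Str.startswith p "jfuse")) = b4
  generalize ((params.map (fun p => PySem.Str.lower p.1)).any (fun x => (["cevp", "cmlt", "ttmp", "rrcs1", "rrcs2", "rcgrw", "rivvel", "epotdist"] : List String).contains x)) = b5
  generalize ((params.map (fun p => PySem.Str.lower p.1)).any (fun x => (["fc", "beta", "k0", "k1", "k2", "maxbas", "perc"] : List String).contains x)) = b6
  generalize ((params.map (fun p => PySem.Str.lower p.1)).any (fun x => (["r2n", "r1n", "flz", "pwr", "zsnl", "zpls", "zplg", "sdep", "xslp", "grkf", "wfci", "fare", "drn", "orgm"] : List String).contains x)) = b7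
  generalize ((params.map (fun p => PySem.Str.lower p.1)).any (fun x => (["hidden_size", "num_layers", "dropout", "learning_rate", "batch_size", "seq_length", "epochs", "patience", "lookback", "lstm_hidden", "lstm_layers", "lr", "weight_decay"] : List String).contains x)) = b8
  generalize ((params.map (fun p => PySem.Str.lower p.1)).any (fun x => (["maxsmc", "satdk", "bb", "slop", "smcmax", "smcwlt", "refkdt", "dksat", "slope", "expon", "max_gw_storage", "cgw", "k_nash", "klf", "kn", "nash_n", "giuh"] : List String).contains x)) = b9
  cases b0 <;> cases b1 <;> cases b2 <;> cases b3 <;> cases b4 <;> cases b5 <;> cases b6 <;> cases b7 <;> cases b8 <;> cases b9 <;> rfl
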